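-- pv_equiv track=rewrite | github.com/netresearch/jira-to-openproject | src/migrations/group_migration.py | _resolve_role_ids
-- ===== SOURCE A (Python) =====
-- def _resolve_role_ids(role_name: str, role_lookup: dict[str, int]) -> list[int]:
--     if not role_lookup:
--         return []
--
--     normalized = str(role_name).strip().lower()
--     if normalized in role_lookup:
--         return [role_lookup[normalized]]
--
--     heuristics = [
--         ("admin" in normalized or "lead" in normalized, ["project admin", "manager", "administrator"]),
--         ("manage" in normalized, ["project admin", "manager"]),
--         ("develop" in normalized or "engineer" in normalized, ["developer", "member"]),
--         ("test" in normalized or "qa" in normalized, ["developer", "member"]),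
--         ("read" in normalized or "view" in normalized or "observe" in normalized, ["reader", "viewer"]),
--         (True, ["member"]),
--     ]
--
--     for condition, candidates in heuristics:
--         if not condition:
--             continue
--         for candidate in candidates:
--             candidate_key = candidate.lower()
--             if candidate_key in role_lookup:
--                 return [role_lookup[candidate_key]]
--     return []
-- ===== SOURCE B (Python) =====
-- def _resolve_role_ids(role_name, role_lookup):
--     if not role_lookup:
--         return []
--     normalized = str(role_name).strip().lower()
--     if normalized in role_lookup:
--         return [role_lookup[normalized]]
--     candidates = []
--     if "admin" in normalized or "lead" in normalized:
--         candidates += ["project admin", "manager", "administrator"]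
--     if "manage" in normalized:
--         candidates += ["project admin", "manager"]
--     if "develop" in normalized or "engineer" in normalized:
--         candidates += ["developer", "member"]
--     if "test" in normalized or "qa" in normalized:
--         candidates += ["developer", "member"]
--     if "read" in normalized or "view" in normalized or "observe" in normalized:
--         candidates += ["reader", "viewer"]
--     candidates.append("member")
--     rank = {}
--     for i, c in enumerate(candidates):
--         rank.setdefault(c, i)
--     best = None
--     for key, value in role_lookup.items():
--         r = rank.get(key)
--         if r is not None and (best is None or r < best[0]):
--             best = (r, value)
--     return [best[1]] if best is not None else []
-- ===== Notes on version B (the rewrite author's own statement) =====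
-- stated objective: alternative
-- what changed: Instead of A's nested loops scanning candidate names against the dict with early returns, B builds the enabled candidate list, assigns each candidate its first-occurrence priority rank in a dict (setdefault), and then makes a single argmin pass over the role_lookup items, returning the value whose key has the smallest rank.
import Mathlib
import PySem

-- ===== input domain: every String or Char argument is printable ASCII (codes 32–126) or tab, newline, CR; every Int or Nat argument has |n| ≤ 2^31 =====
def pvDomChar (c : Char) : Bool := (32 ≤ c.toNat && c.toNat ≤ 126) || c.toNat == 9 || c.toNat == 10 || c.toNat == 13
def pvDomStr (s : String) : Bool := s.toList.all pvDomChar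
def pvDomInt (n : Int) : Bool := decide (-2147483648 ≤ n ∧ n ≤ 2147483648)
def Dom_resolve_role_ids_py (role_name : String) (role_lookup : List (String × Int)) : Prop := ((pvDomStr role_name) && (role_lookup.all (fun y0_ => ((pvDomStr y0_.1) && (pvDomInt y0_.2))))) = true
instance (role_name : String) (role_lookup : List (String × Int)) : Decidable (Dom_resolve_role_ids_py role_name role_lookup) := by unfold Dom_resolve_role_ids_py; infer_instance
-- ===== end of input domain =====

-- B replaces A's nested candidate-vs-dict scan with early returns by a rank table
-- (candidate -> first-occurrence priority) and a single argmin pass over the dict items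
-- (objective: alternative algorithm; same return value).

-- ===== PORT A =====
-- inner loop: for candidate in candidates: if candidate.lower() in role_lookup: return [v]
def pvScanA (d : PySem.Dict String Int) : List String → Option Int
  | [] => none
  | c :: rest =>
    let key := PySem.Str.lower c
    match d.get? key with
    | some v => some v
    | none => pvScanA d rest

-- outer loop: for condition, candidates in heuristics: if not condition: continue; …
def pvHeurLoop (d : PySem.Dict String Int) : List (Bool × List String) → List Int
  | [] => []
  | (cond, cands) :: rest =>
    if !cond then pvHeurLoop d rest
    else
      match pvScanA d cands with
      | some v => [v]
      | none => pvHeurLoop d rest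

def resolve_role_ids_py (role_name : String) (role_lookup : List (String × Int)) : List Int :=
  if role_lookup.isEmpty then []
  else
    let d := PySem.Dict.mk role_lookup
    let normalized := PySem.Str.lower (PySem.Str.strip role_name)
    if d.contains normalized then [d.getD normalized 0]
    else
      let heuristics : List (Bool × List String) :=
        [ (PySem.Str.isIn "admin" normalized || PySem.Str.isIn "lead" normalized,
            ["project admin", "manager", "administrator"]),
          (PySem.Str.isIn "manage" normalized, ["project admin", "manager"]),
          (PySem.Str.isIn "develop" normalized || PySem.Str.isIn "engineer" normalized,
            ["developer", "member"]),
          (PySem.Str.isIn "test" normalized || PySem.Str.isIn "qa" normalized,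
            ["developer", "member"]),
          (PySem.Str.isIn "read" normalized || PySem.Str.isIn "view" normalized ||
             PySem.Str.isIn "observe" normalized, ["reader", "viewer"]),
          (true, ["member"]) ]
      pvHeurLoop d heuristics

-- ===== PORT B =====
-- the conditional-append construction of `candidates` (B's if/+= chain, then .append("member"))
def pvCandidates (n : String) : List String :=
  let c0 : List String := []
  let c1 := if PySem.Str.isIn "admin" n || PySem.Str.isIn "lead" n then
      c0 ++ ["project admin", "manager", "administrator"] else c0
  let c2 := if PySem.Str.isIn "manage" n then c1 ++ ["project admin", "manager"] else c1
  let c3 := if PySem.Str.isIn "develop" n || PySem.Str.isIn "engineer" n then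
      c2 ++ ["developer", "member"] else c2
  let c4 := if PySem.Str.isIn "test" n || PySem.Str.isIn "qa" n then
      c3 ++ ["developer", "member"] else c3
  let c5 := if PySem.Str.isIn "read" n || PySem.Str.isIn "view" n ||
      PySem.Str.isIn "observe" n then c4 ++ ["reader", "viewer"] else c4
  c5 ++ ["member"]

-- for i, c in enumerate(candidates): rank.setdefault(c, i)
def pvRank (cands : List String) : PySem.Dict String Int :=
  (PySem.List.enumerate cands 0).foldl (fun r p => r.setdefault p.2 p.1) PySem.Dict.empty

-- loop body: r = rank.get(key); if r is not None and (best is None or r < best[0]): best = (r, value)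
def pvBestStep (rank : PySem.Dict String Int) (best : Option (Int × Int)) (p : String × Int) :
    Option (Int × Int) :=
  match rank.get? p.1 with
  | none => best
  | some r =>
    match best with
    | none => some (r, p.2)
    | some (br, _) => if r < br then some (r, p.2) else best

def resolve_role_ids_py_alt (role_name : String) (role_lookup : List (String × Int)) : List Int :=
  if role_lookup.isEmpty then []
  else
    let d := PySem.Dict.mk role_lookup
    let normalized := PySem.Str.lower (PySem.Str.strip role_name)
    if d.contains normalized then [d.getD normalized 0]
    else
      let candidates := pvCandidates normalized
      let rank := pvRank candidates
      let best := d.items.foldl (pvBestStep rank) none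
      match best with
      | some (_, v) => [v]
      | none => []

-- ===== PRECONDITION & SPEC =====
def Spec_resolve_role_ids_py (role_name : String) (role_lookup : List (String × Int)) (out : List Int) : Prop := out = resolve_role_ids_py_alt role_name role_lookup
instance (role_name : String) (role_lookup : List (String × Int)) (out : List Int) : Decidable (Spec_resolve_role_ids_py role_name role_lookup out) := by unfold Spec_resolve_role_ids_py; infer_instance

-- ===== CLAIM (what is proved, stated in full; the proofs are below) =====
def Claim_equal_resolve_role_ids_py : Prop := ∀ (role_name : String) (role_lookup : List (String × Int)), Dom_resolve_role_ids_py role_name role_lookup → Spec_resolve_role_ids_py role_name role_lookup (resolve_role_ids_py role_name role_lookup)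

-- ===== LEMMAS AND PROOFS =====

-- rank of a candidate = its first index in cands, counted from s (spec of the setdefault loop)
def pvRankSpec (c : String) : List String → Int → Option Int
  | [], _ => none
  | x :: rest, s => if x == c then some s else pvRankSpec c rest (s + 1)

-- first-match association-list lookup (what Dict.mk's get? computes)
def pvLk : List (String × Int) → String → Option Int
  | [], _ => none
  | p :: L, c => if p.1 == c then some p.2 else pvLk L c

-- first candidate (from position s) whose key is present, with its position
def pvScanL (L : List (String × Int)) : List String → Int → Option (Int × Int)
  | [], _ => none
  | c :: rest, s =>
    match pvLk L c with
    | some v => some (s, v)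
    | none => pvScanL L rest (s + 1)

-- keep the earlier element unless the later one has strictly smaller rank
def pvCombine : Option (Int × Int) → Option (Int × Int) → Option (Int × Int)
  | b, none => b
  | none, some m => some m
  | some b, some m => if m.1 < b.1 then some m else some b

-- the argmin (first-wins) of the ranked items of L
def pvM (g : String → Option Int) : List (String × Int) → Option (Int × Int)
  | [] => none
  | p :: L =>
    pvCombine (match g p.1 with | none => none | some r => some (r, p.2)) (pvM g L)

lemma pvCombine_none_left (m : Option (Int × Int)) : pvCombine none m = m := by
  cases m <;> rfl

lemma pvCombine_none_right (b : Option (Int × Int)) : pvCombine b none = b := rfl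

lemma pvCombine_assoc (a b c : Option (Int × Int)) :
    pvCombine (pvCombine a b) c = pvCombine a (pvCombine b c) := by
  rcases a with _ | ⟨ar, av⟩
  · simp only [pvCombine_none_left]
  rcases b with _ | ⟨br, bv⟩
  · simp only [pvCombine_none_right, pvCombine_none_left]
  rcases c with _ | ⟨cr, cv⟩
  · simp only [pvCombine_none_right]
  by_cases h1 : br < ar <;> by_cases h2 : cr < br <;> by_cases h3 : cr < ar <;>
    simp only [pvCombine, h1, h2, h3, if_true, if_false] <;> first | rfl | (exfalso; omega)

lemma pvBestStep_eq (rank : PySem.Dict String Int) (b : Option (Int × Int)) (p : String × Int) :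
    pvBestStep rank b p =
      pvCombine b (match rank.get? p.1 with | none => none | some r => some (r, p.2)) := by
  rcases hg : rank.get? p.1 with _ | r <;> rcases b with _ | ⟨br, bv⟩ <;>
    simp [pvBestStep, pvCombine, hg]

lemma foldl_best (rank : PySem.Dict String Int) (L : List (String × Int)) :
    ∀ b, L.foldl (pvBestStep rank) b = pvCombine b (pvM (fun k => rank.get? k) L) := by
  induction L with
  | nil => intro b; cases b <;> rfl
  | cons p L ih =>
    intro b
    simp only [List.foldl_cons, ih, pvBestStep_eq, pvM, pvCombine_assoc]

lemma rank_get (c : String) (cands : List String) :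
    ∀ (s : Int) (r : PySem.Dict String Int),
      ((PySem.List.enumerate cands s).foldl (fun r p => r.setdefault p.2 p.1) r).get? c =
        (match r.get? c with | some v => some v | none => pvRankSpec c cands s) := by
  induction cands with
  | nil =>
    intro s r
    simp only [PySem.List.enumerate_nil, List.foldl_nil, pvRankSpec]
    cases r.get? c <;> rfl
  | cons x rest ih =>
    intro s r
    rw [PySem.List.enumerate_cons]
    simp only [List.foldl_cons, ih]
    by_cases hx : x = c
    · subst hx
      rw [PySem.Dict.get?_setdefault_self r x s]
      simp only [pvRankSpec, BEq.rfl, if_true]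
      cases r.get? x <;> rfl
    · rw [PySem.Dict.get?_setdefault_of_ne r s (Ne.symm hx)]
      simp only [pvRankSpec, beq_iff_eq, hx, if_false]

lemma pvRank_get (cands : List String) (c : String) :
    (pvRank cands).get? c = pvRankSpec c cands 0 := by
  unfold pvRank
  rw [rank_get]
  simp [PySem.Dict.get?_empty]

lemma rankSpec_le (c : String) (cands : List String) :
    ∀ s r, pvRankSpec c cands s = some r → s ≤ r := by
  induction cands with
  | nil => intro s r h; simp [pvRankSpec] at h
  | cons x rest ih =>
    intro s r h
    simp only [pvRankSpec] at h
    split_ifs at h with hx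
    · cases h; omega
    · have := ih (s + 1) r h; omega

lemma pvM_le (g : String → Option Int) (s : Int) (hg : ∀ k r, g k = some r → s ≤ r) :
    ∀ (L : List (String × Int)) r v, pvM g L = some (r, v) → s ≤ r := by
  intro L
  induction L with
  | nil => intro r v h; simp [pvM] at h
  | cons p L ih =>
    intro r v h
    simp only [pvM] at h
    rcases he : g p.1 with _ | re
    · rw [he] at h
      rw [pvCombine_none_left] at h
      exact ih r v h
    · rw [he] at h
      rcases hm : pvM g L with _ | ⟨mr, mv⟩
      · rw [hm] at h
        simp only [pvCombine] at h
        cases h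
        exact hg _ _ he
      · rw [hm] at h
        simp only [pvCombine] at h
        split_ifs at h with hlt
        · cases h; exact ih _ _ hm
        · cases h; exact hg _ _ he

lemma pvM_congr (g g₂ : String → Option Int) :
    ∀ L : List (String × Int), (∀ p ∈ L, g p.1 = g₂ p.1) → pvM g L = pvM g₂ L := by
  intro L
  induction L with
  | nil => intro _; rfl
  | cons p L ih =>
    intro h
    simp only [pvM, h p (by simp), ih (fun q hq => h q (by simp [hq]))]

lemma pvM_of_none (g : String → Option Int) (hg : ∀ k, g k = none) :
    ∀ L : List (String × Int), pvM g L = none := by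
  intro L
  induction L with
  | nil => rfl
  | cons p L ih => simp only [pvM, hg, ih]; rfl

lemma pvM_found (g' : String → Option Int) (s : Int)
    (hb : ∀ k r, g' k = some r → s + 1 ≤ r) (x : String) :
    ∀ (L : List (String × Int)) v, pvLk L x = some v →
      pvM (fun k => if x == k then some s else g' k) L = some (s, v) := by
  intro L
  induction L with
  | nil => intro v h; simp [pvLk] at h
  | cons p L ih =>
    intro v h
    simp only [pvLk] at h
    by_cases hk : p.1 = x
    · simp only [hk, BEq.rfl, if_true, Option.some.injEq] at h
      subst h
      simp only [pvM, hk, BEq.rfl, if_true]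
      have hbound : ∀ k r, (if x == k then some s else g' k) = some r → s ≤ r := by
        intro k r hkr
        split_ifs at hkr with hxk
        · cases hkr; omega
        · exact le_trans (by omega) (hb k r hkr)
      rcases hm : pvM (fun k => if x == k then some s else g' k) L with _ | ⟨mr, mv⟩
      · rfl
      · have hs : s ≤ mr := pvM_le _ s hbound L mr mv hm
        simp only [pvCombine]
        split_ifs with hlt
        · omega
        · rfl
    · have hne : (p.1 == x) = false := by simp [hk]
      rw [hne] at h
      simp only [if_false, Bool.false_eq_true] at h
      have hxp : (x == p.1) = false := by simp [Ne.symm hk]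
      simp only [pvM, hxp, if_false, Bool.false_eq_true, ih v h]
      rcases he : g' p.1 with _ | re
      · rfl
      · have : s + 1 ≤ re := hb _ _ he
        simp only [pvCombine]
        split_ifs with hlt
        · rfl
        · omega

lemma pvLk_none (x : String) :
    ∀ L : List (String × Int), pvLk L x = none → ∀ p ∈ L, p.1 ≠ x := by
  intro L
  induction L with
  | nil => intro _ p hp; simp at hp
  | cons q L ih =>
    intro h p hp
    rcases List.mem_cons.1 hp with rfl | hp'
    · intro hpx
      simp [pvLk, hpx] at h
    · by_cases hq : q.1 = x
      · simp [pvLk, hq] at h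
      · simp only [pvLk] at h
        rw [if_neg (by simp [hq])] at h
        exact ih h p hp'

lemma pvM_eq_scan (L : List (String × Int)) :
    ∀ (cands : List String) (s : Int),
      pvM (fun k => pvRankSpec k cands s) L = pvScanL L cands s := by
  intro cands
  induction cands with
  | nil =>
    intro s
    exact pvM_of_none _ (fun k => rfl) L
  | cons x rest ih =>
    intro s
    have hfun : (fun k => pvRankSpec k (x :: rest) s) =
        (fun k => if x == k then some s else pvRankSpec k rest (s + 1)) := rfl
    rw [hfun]
    rcases h : pvLk L x with _ | v
    · have hg : ∀ p ∈ L, (if x == p.1 then some s else pvRankSpec p.1 rest (s + 1)) =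
          pvRankSpec p.1 rest (s + 1) := by
        intro p hp
        have := pvLk_none x L h p hp
        simp [Ne.symm this]
      rw [pvM_congr _ (fun k => pvRankSpec k rest (s + 1)) L hg, ih (s + 1)]
      simp only [pvScanL, h]
    · rw [pvM_found _ s (fun k r => rankSpec_le k rest (s + 1) r) x L v h]
      simp only [pvScanL, h]

lemma get?_mk_eq_lk : ∀ (L : List (String × Int)) (c : String),
    (PySem.Dict.mk L).get? c = pvLk L c := by
  intro L
  induction L with
  | nil => intro c; rfl
  | cons p L ih =>
    intro c
    rw [show p = (p.1, p.2) from rfl, PySem.Dict.get?_mk_cons]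
    simp only [pvLk, ih]

lemma scanA_eq_scanL (L : List (String × Int)) :
    ∀ (cands : List String) (s : Int), (∀ c ∈ cands, PySem.Str.lower c = c) →
      pvScanA (PySem.Dict.mk L) cands = (pvScanL L cands s).map (·.2) := by
  intro cands
  induction cands with
  | nil => intro s _; rfl
  | cons c rest ih =>
    intro s hl
    have hc : PySem.Str.lower c = c := hl c (by simp)
    simp only [pvScanA, pvScanL, hc, get?_mk_eq_lk]
    rcases h : pvLk L c with _ | v
    · exact ih (s + 1) (fun x hx => hl x (by simp [hx]))
    · rfl

-- scanning a concatenation scans the pieces in order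
lemma pvScanA_append (d : PySem.Dict String Int) (l1 l2 : List String) :
    pvScanA d (l1 ++ l2) = ((pvScanA d l1).rec (pvScanA d l2) (fun v => some v)) := by
  induction l1 with
  | nil => simp [pvScanA]
  | cons c rest ih =>
    simp only [List.cons_append, pvScanA]
    cases d.get? (PySem.Str.lower c) <;> simp [ih]

-- A's two nested loops equal one scan over the flattened enabled candidate blocks
lemma pvHeurLoop_eq (d : PySem.Dict String Int) (hs : List (Bool × List String)) :
    pvHeurLoop d hs =
      (match pvScanA d (hs.flatMap (fun p => if p.1 then p.2 else [])) with
       | some v => [v] | none => []) := by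
  induction hs with
  | nil => simp [pvHeurLoop, pvScanA]
  | cons p rest ih =>
    obtain ⟨b, L⟩ := p
    cases b with
    | false => simpa [pvHeurLoop] using ih
    | true =>
      simp only [pvHeurLoop, List.flatMap_cons, if_pos, Bool.not_true, Bool.false_eq_true,
        if_false, pvScanA_append]
      cases h : pvScanA d L <;> simp [ih]

-- the flattened enabled blocks of A's heuristics equal B's conditionally-appended candidates
lemma pvCand_eq (n : String) :
    (([ (PySem.Str.isIn "admin" n || PySem.Str.isIn "lead" n,
          ["project admin", "manager", "administrator"]),
        (PySem.Str.isIn "manage" n, ["project admin", "manager"]),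
        (PySem.Str.isIn "develop" n || PySem.Str.isIn "engineer" n, ["developer", "member"]),
        (PySem.Str.isIn "test" n || PySem.Str.isIn "qa" n, ["developer", "member"]),
        (PySem.Str.isIn "read" n || PySem.Str.isIn "view" n || PySem.Str.isIn "observe" n,
          ["reader", "viewer"]),
        (true, ["member"]) ] : List (Bool × List String)).flatMap
        (fun p => if p.1 then p.2 else [])) = pvCandidates n := by
  unfold pvCandidates
  cases h1 : (PySem.Str.isIn "admin" n || PySem.Str.isIn "lead" n) <;>
  cases h2 : PySem.Str.isIn "manage" n <;>
  cases h3 : (PySem.Str.isIn "develop" n || PySem.Str.isIn "engineer" n) <;>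
  cases h4 : (PySem.Str.isIn "test" n || PySem.Str.isIn "qa" n) <;>
  cases h5 : (PySem.Str.isIn "read" n || PySem.Str.isIn "view" n ||
    PySem.Str.isIn "observe" n) <;>
  simp

-- every candidate is already lower-case
lemma pvCand_lower (n : String) :
    ∀ c ∈ pvCandidates n, PySem.Str.lower c = c := by
  unfold pvCandidates
  cases h1 : (PySem.Str.isIn "admin" n || PySem.Str.isIn "lead" n) <;>
  cases h2 : PySem.Str.isIn "manage" n <;>
  cases h3 : (PySem.Str.isIn "develop" n || PySem.Str.isIn "engineer" n) <;>
  cases h4 : (PySem.Str.isIn "test" n || PySem.Str.isIn "qa" n) <;>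
  cases h5 : (PySem.Str.isIn "read" n || PySem.Str.isIn "view" n ||
    PySem.Str.isIn "observe" n) <;>
  simp only [if_true, if_false, Bool.false_eq_true, List.nil_append] <;>
  decide

-- ===== VERDICT (by name: the statement is the Claim_ definition above) =====
theorem resolve_role_ids_py_spec : Claim_equal_resolve_role_ids_py := by
  intro role_name role_lookup _
  unfold Spec_resolve_role_ids_py resolve_role_ids_py resolve_role_ids_py_alt
  by_cases he : role_lookup.isEmpty
  · simp [he]
  · simp only [he, Bool.false_eq_true, if_false]
    set n := PySem.Str.lower (PySem.Str.strip role_name) with hn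
    by_cases hc : (PySem.Dict.mk role_lookup).contains n
    · simp only [hc, if_true]
    · simp only [hc, Bool.false_eq_true, if_false]
      rw [pvHeurLoop_eq, pvCand_eq n]
      rw [foldl_best, pvCombine_none_left]
      have hrank : pvM (fun k => (pvRank (pvCandidates n)).get? k) role_lookup =
          pvM (fun k => pvRankSpec k (pvCandidates n) 0) role_lookup :=
        pvM_congr _ _ role_lookup (fun p _ => pvRank_get (pvCandidates n) p.1)
      rw [hrank, pvM_eq_scan,
        scanA_eq_scanL role_lookup (pvCandidates n) 0 (pvCand_lower n)]
      rcases hs : pvScanL role_lookup (pvCandidates n) 0 with _ | ⟨r, v⟩ <;> rfl
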